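-- pv_equiv track=rewrite | github.com/logflux/logflux | src/logflux/molfi.py | crossover_chromosomes
-- ===== SOURCE A (Python) =====
-- def construct_pairs(chromosome_num):
--     #make pairs to be crossovered (1, n-1)
--     if chromosome_num%2==0:
--         pairs = []
--         for i in range(chromosome_num//2):
--             pairs.append([i, chromosome_num-1-i])
--     else:
--         pairs = []
--         for i in range(chromosome_num//2):
--             pairs.append([i, chromosome_num-1-i])
--         pairs.append([chromosome_num//2])
--
--     return pairs
--
-- def crossover(ch1, ch2):
--     ch1_len = len(ch1)
--     ch2_len = len(ch2)
--
--     ch1_mid = ch1_len//2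
--     ch2_mid = ch2_len//2
--
--     ch1_head, ch1_tail = ch1[:ch1_mid], ch1[ch1_mid:]
--     ch2_head, ch2_tail = ch2[:ch2_mid], ch2[ch2_mid:]
--
--     new_ch1 = ch1_head+ch2_tail
--     new_ch2 = ch2_head+ch1_tail
--
--     return new_ch1, new_ch2
--
-- def crossover_chromosomes(chromosomes):
--     chromosome_num = len(chromosomes)
--     chromosome_pairs = construct_pairs(chromosome_num)
--
--     new_chromosomes = []
--     for ch_pair in chromosome_pairs:
--         if len(ch_pair) == 1:
--             #only one chrosome no need to cross over
--             ch_idx = ch_pair[0]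
--             ch = chromosomes[ch_idx]
--             new_chromosomes.append(ch)
--         elif len(ch_pair) == 2:
--             #two chrosomes crossover it
--             ch1_idx, ch2_idx = ch_pair
--             ch1, ch2 = chromosomes[ch1_idx], chromosomes[ch2_idx]
--
--             new_ch1, new_ch2 = crossover(ch1, ch2)
--
--             new_chromosomes.append(new_ch1)
--             new_chromosomes.append(new_ch2)
--         else:
--             raise Exception("pair should have 1 or 2 elements")
--
--     return new_chromosomes
-- ===== SOURCE B (Python) =====
-- def crossover_chromosomes(chromosomes):
--     # recursive: peel the first and last chromosome, crossover them, recurse on the torso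
--     if len(chromosomes) <= 1:
--         return list(chromosomes)
--     a = chromosomes[0]
--     b = chromosomes[-1]
--     am = len(a) // 2
--     bm = len(b) // 2
--     return [a[:am] + b[bm:], b[:bm] + a[am:]] + crossover_chromosomes(chromosomes[1:-1])
-- ===== Notes on version B (the rewrite author's own statement) =====
-- stated objective: simpler
-- what changed: Replaces A's construct_pairs index table plus per-pair length dispatch with a recursion that peels the first and last chromosome off the list, emits their two crossover halves, and recurses on the torso chromosomes[1:-1]; no index arithmetic or pair lists remain.
import Mathlib
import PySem

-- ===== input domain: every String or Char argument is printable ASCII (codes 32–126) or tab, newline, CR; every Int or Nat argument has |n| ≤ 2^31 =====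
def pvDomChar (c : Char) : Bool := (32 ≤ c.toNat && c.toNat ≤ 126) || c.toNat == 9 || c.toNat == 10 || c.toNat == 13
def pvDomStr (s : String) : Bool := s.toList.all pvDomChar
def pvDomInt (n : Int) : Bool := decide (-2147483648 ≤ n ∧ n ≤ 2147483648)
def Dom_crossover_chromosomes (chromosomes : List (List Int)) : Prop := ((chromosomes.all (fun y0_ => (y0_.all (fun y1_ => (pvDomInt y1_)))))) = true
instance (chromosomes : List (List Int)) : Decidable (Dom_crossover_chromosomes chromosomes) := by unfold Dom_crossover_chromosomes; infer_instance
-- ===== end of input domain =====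

-- B replaces A's index-pair table and dispatch loop by a recursion that peels the first and
-- last chromosome, crossovers them, and recurses on the torso (objective: simpler).

-- ===== PORT A =====
def pv_construct_pairs (n : Int) : List (List Int) :=
  if PySem.Int.mod n 2 = 0 then
    (PySem.List.pyRange 0 (PySem.Int.floordiv n 2) 1).foldl
      (fun pairs i => pairs ++ [[i, n - 1 - i]]) []
  else
    ((PySem.List.pyRange 0 (PySem.Int.floordiv n 2) 1).foldl
      (fun pairs i => pairs ++ [[i, n - 1 - i]]) []) ++ [[PySem.Int.floordiv n 2]]

def pv_crossover (ch1 ch2 : List Int) : List Int × List Int :=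
  let ch1_mid := PySem.Int.floordiv (ch1.length : Int) 2
  let ch2_mid := PySem.Int.floordiv (ch2.length : Int) 2
  let ch1_head := PySem.List.slice ch1 none (some ch1_mid)
  let ch1_tail := PySem.List.slice ch1 (some ch1_mid) none
  let ch2_head := PySem.List.slice ch2 none (some ch2_mid)
  let ch2_tail := PySem.List.slice ch2 (some ch2_mid) none
  (ch1_head ++ ch2_tail, ch2_head ++ ch1_tail)

def crossover_chromosomes (chromosomes : List (List Int)) : List (List Int) :=
  let chromosome_num : Int := chromosomes.length
  let chromosome_pairs := pv_construct_pairs chromosome_num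
  chromosome_pairs.foldl (fun new_chromosomes ch_pair =>
    match ch_pair with
    | [ch_idx] =>
        new_chromosomes ++ [PySem.List.pyGetD chromosomes ch_idx []]
    | [ch1_idx, ch2_idx] =>
        let c := pv_crossover (PySem.List.pyGetD chromosomes ch1_idx [])
                              (PySem.List.pyGetD chromosomes ch2_idx [])
        new_chromosomes ++ [c.1, c.2]
    | _ => new_chromosomes  -- Python raises here; unreachable for pairs built by construct_pairs
    ) []

-- ===== PORT B =====
-- termination helper for the port's recursion on chromosomes[1:-1]
theorem pv_slice_one_negone_len_lt {α : Type} (xs : List α) (h : ¬ xs.length ≤ 1) :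
    (PySem.List.slice xs (some 1) (some (-1))).length < xs.length := by
  have hne : xs ≠ [] := by intro h'; subst h'; simp at h
  rw [PySem.List.length_slice]
  simp [PySem.List.clampIdx, hne]
  omega

def crossover_chromosomes_alt (chromosomes : List (List Int)) : List (List Int) :=
  if h : chromosomes.length ≤ 1 then chromosomes
  else
    let a := PySem.List.pyGetD chromosomes 0 []
    let b := PySem.List.pyGetD chromosomes (-1) []
    let am := PySem.Int.floordiv (a.length : Int) 2
    let bm := PySem.Int.floordiv (b.length : Int) 2
    [PySem.List.slice a none (some am) ++ PySem.List.slice b (some bm) none,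
     PySem.List.slice b none (some bm) ++ PySem.List.slice a (some am) none]
    ++ crossover_chromosomes_alt (PySem.List.slice chromosomes (some 1) (some (-1)))
  termination_by chromosomes.length
  decreasing_by exact pv_slice_one_negone_len_lt chromosomes h

-- ===== PRECONDITION & SPEC =====
def Spec_crossover_chromosomes (chromosomes : List (List Int)) (out : List (List Int)) : Prop := out = crossover_chromosomes_alt chromosomes
instance (chromosomes : List (List Int)) (out : List (List Int)) : Decidable (Spec_crossover_chromosomes chromosomes out) := by unfold Spec_crossover_chromosomes; infer_instance

-- ===== CLAIM (what is proved, stated in full; the proofs are below) =====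
def Claim_equal_crossover_chromosomes : Prop := ∀ (chromosomes : List (List Int)), Dom_crossover_chromosomes chromosomes → Spec_crossover_chromosomes chromosomes (crossover_chromosomes chromosomes)

-- ===== LEMMAS AND PROOFS =====

-- common closed form of both programs
def pvCross (a b : List Int) : List (List Int) :=
  [a.take (a.length / 2) ++ b.drop (b.length / 2),
   b.take (b.length / 2) ++ a.drop (a.length / 2)]

def pvF (xs : List (List Int)) : List (List Int) :=
  ((List.range (xs.length / 2)).flatMap fun i =>
      pvCross (xs.getD i []) (xs.getD (xs.length - 1 - i) []))
  ++ (if xs.length % 2 = 1 then [xs.getD (xs.length / 2) []] else [])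

theorem pv_slice_mid (l : List Int) :
    PySem.List.slice l none (some (PySem.Int.floordiv (l.length : Int) 2)) = l.take (l.length / 2) ∧
    PySem.List.slice l (some (PySem.Int.floordiv (l.length : Int) 2)) none = l.drop (l.length / 2) := by
  have hf : PySem.Int.floordiv (l.length : Int) 2 = ((l.length / 2 : Nat) : Int) := by
    exact_mod_cast PySem.Int.floordiv_natCast l.length 2
  rw [hf, PySem.List.slice_to_natCast, PySem.List.slice_from_natCast]
  exact ⟨rfl, rfl⟩

theorem pv_crossover_eq (a b : List Int) :
    [(pv_crossover a b).1, (pv_crossover a b).2] = pvCross a b := by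
  simp only [pv_crossover, pvCross,
    (pv_slice_mid a).1, (pv_slice_mid a).2, (pv_slice_mid b).1, (pv_slice_mid b).2]

theorem pv_fold_dispatch (xs : List (List Int)) (n : Int) (l : List Int) (acc : List (List Int)) :
    (l.map (fun i => [i, n - 1 - i])).foldl (fun new_chromosomes ch_pair =>
      match ch_pair with
      | [ch_idx] =>
          new_chromosomes ++ [PySem.List.pyGetD xs ch_idx []]
      | [ch1_idx, ch2_idx] =>
          new_chromosomes ++
            [(pv_crossover (PySem.List.pyGetD xs ch1_idx []) (PySem.List.pyGetD xs ch2_idx [])).1,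
             (pv_crossover (PySem.List.pyGetD xs ch1_idx []) (PySem.List.pyGetD xs ch2_idx [])).2]
      | _ => new_chromosomes) acc
    = acc ++ l.flatMap (fun i =>
        [(pv_crossover (PySem.List.pyGetD xs i []) (PySem.List.pyGetD xs (n - 1 - i) [])).1,
         (pv_crossover (PySem.List.pyGetD xs i []) (PySem.List.pyGetD xs (n - 1 - i) [])).2]) := by
  induction l generalizing acc with
  | nil => simp
  | cons y ys ih =>
    simp only [List.map_cons, List.foldl_cons, List.flatMap_cons]
    rw [ih]
    simp

theorem pvA_eq_pvF (xs : List (List Int)) : crossover_chromosomes xs = pvF xs := by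
  simp only [crossover_chromosomes, pv_construct_pairs]
  have hmod : PySem.Int.mod (xs.length : Int) 2 = ((xs.length % 2 : Nat) : Int) := by
    exact_mod_cast PySem.Int.mod_natCast xs.length 2
  have hdiv : PySem.Int.floordiv (xs.length : Int) 2 = ((xs.length / 2 : Nat) : Int) := by
    exact_mod_cast PySem.Int.floordiv_natCast xs.length 2
  have hrange : PySem.List.pyRange 0 ((xs.length / 2 : Nat) : Int) 1
      = (List.range (xs.length / 2)).map (fun k : Nat => (k : Int)) :=
    PySem.List.pyRange_zero_natCast (xs.length / 2)
  have hbody : ∀ k ∈ List.range (xs.length / 2),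
      [(pv_crossover (PySem.List.pyGetD xs (k : Int) [])
          (PySem.List.pyGetD xs ((xs.length : Int) - 1 - (k : Int)) [])).1,
       (pv_crossover (PySem.List.pyGetD xs (k : Int) [])
          (PySem.List.pyGetD xs ((xs.length : Int) - 1 - (k : Int)) [])).2]
      = pvCross (xs.getD k []) (xs.getD (xs.length - 1 - k) []) := by
    intro k hk
    simp only [List.mem_range] at hk
    have hkn : k < xs.length := by omega
    have e : (xs.length : Int) - 1 - (k : Int) = ((xs.length - 1 - k : Nat) : Int) := by
      omega
    rw [e, PySem.List.pyGetD_natCast, PySem.List.pyGetD_natCast, pv_crossover_eq]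
  rw [hmod, hdiv, PySem.List.foldl_append_singleton_eq_map]
  simp only [List.nil_append]
  by_cases hpar : xs.length % 2 = 1
  · rw [if_neg (by exact_mod_cast (by omega : ¬ ((xs.length % 2 : Nat) : Int) = 0))]
    rw [List.foldl_append, pv_fold_dispatch]
    simp only [List.foldl_cons, List.foldl_nil, List.nil_append]
    rw [hrange, List.flatMap_map]
    unfold pvF
    rw [if_pos hpar, List.flatMap_congr hbody, PySem.List.pyGetD_natCast]
  · rw [if_pos (by exact_mod_cast (by omega : ((xs.length % 2 : Nat) : Int) = 0))]
    rw [pv_fold_dispatch]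
    simp only [List.nil_append]
    rw [hrange, List.flatMap_map]
    unfold pvF
    rw [if_neg hpar, List.flatMap_congr hbody]
    simp

theorem pv_getD_mid (a b : List Int) (mid : List (List Int)) (k : Nat) (hk : k < mid.length) :
    (a :: mid ++ [b]).getD (k + 1) [] = mid.getD k [] := by
  simp [List.getD, List.getElem?_append_left, hk]

theorem pvF_peel (a b : List Int) (mid : List (List Int)) :
    pvF (a :: mid ++ [b]) = pvCross a b ++ pvF mid := by
  unfold pvF
  have hm : (a :: mid ++ [b]).length = mid.length + 2 := by simp
  rw [hm]
  have hdiv : (mid.length + 2) / 2 = mid.length / 2 + 1 := by omega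
  have hmod : (mid.length + 2) % 2 = mid.length % 2 := by omega
  rw [hdiv, hmod, List.range_succ_eq_map]
  simp only [List.flatMap_cons, List.flatMap_map]
  have h0 : (a :: mid ++ [b]).getD 0 [] = a := rfl
  have hlast : (a :: mid ++ [b]).getD (mid.length + 2 - 1 - 0) [] = b := by
    simp [List.getD]
  rw [h0, hlast]
  have hbody : ∀ i ∈ List.range (mid.length / 2),
      (fun i => pvCross ((a :: mid ++ [b]).getD i [])
        ((a :: mid ++ [b]).getD (mid.length + 2 - 1 - i) [])) (Nat.succ i)
      = pvCross (mid.getD i []) (mid.getD (mid.length - 1 - i) []) := by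
    intro i hi
    simp only [List.mem_range] at hi
    have him : i < mid.length := by omega
    have h1 := pv_getD_mid a b mid i him
    have e : mid.length + 2 - 1 - (i + 1) = (mid.length - 1 - i) + 1 := by omega
    have h2 := pv_getD_mid a b mid (mid.length - 1 - i) (by omega)
    simp only [Nat.succ_eq_add_one, h1, e, h2]
  rw [List.flatMap_congr hbody]
  by_cases hpar : mid.length % 2 = 1
  · have hmid := pv_getD_mid a b mid (mid.length / 2) (by omega)
    rw [if_pos hpar, if_pos hpar, hmid]
    simp [pvCross]
  · rw [if_neg hpar, if_neg hpar]
    simp [pvCross]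

theorem pv_slice_one_negone {α : Type} (xs : List α) :
    PySem.List.slice xs (some 1) (some (-1)) = xs.tail.dropLast := by
  cases xs with
  | nil => rfl
  | cons x t =>
    have h : ¬ ((t.length : Int) < 0) := by omega
    simp [PySem.List.slice, PySem.List.clampIdx, List.dropLast_eq_take, h]

theorem pvB_eq_pvF (xs : List (List Int)) : crossover_chromosomes_alt xs = pvF xs := by
  induction xs using crossover_chromosomes_alt.induct with
  | case1 xs h =>
    rw [crossover_chromosomes_alt, dif_pos h]
    match xs, h with
    | [], _ => rfl
    | [x], _ => simp [pvF]
  | case2 xs h ih =>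
    rw [crossover_chromosomes_alt, dif_neg h]
    obtain ⟨x, t, rfl⟩ : ∃ y ys, xs = y :: ys := by
      cases xs with
      | nil => simp at h
      | cons y ys => exact ⟨y, ys, rfl⟩
    have ht : t ≠ [] := by intro h'; subst h'; simp at h
    have hx : x :: t = (x :: t.dropLast) ++ [t.getLast ht] := by
      rw [List.cons_append, List.dropLast_append_getLast ht]
    rw [pv_slice_one_negone] at ih ⊢
    simp only [List.tail_cons] at ih ⊢
    conv_rhs => rw [hx]
    rw [pvF_peel, ih]
    congr 1
    have hg0 : PySem.List.pyGetD (x :: t) 0 [] = x := by simp [pysem]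
    have hg1 : PySem.List.pyGetD (x :: t) (-1) [] = t.getLast ht := by
      rw [PySem.List.pyGetD_neg_one (x :: t) [] (by simp)]
      simp [List.getLast_cons ht]
    rw [hg0, hg1]
    rw [(pv_slice_mid x).1, (pv_slice_mid x).2,
       (pv_slice_mid (t.getLast ht)).1, (pv_slice_mid (t.getLast ht)).2]
    rfl

-- ===== VERDICT (by name: the statement is the Claim_ definition above) =====
theorem crossover_chromosomes_spec : Claim_equal_crossover_chromosomes := by
  intro xs _
  show _ = _
  rw [pvA_eq_pvF, pvB_eq_pvF]
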